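-- pv_equiv track=rewrite | github.com/karanpratapsingh/uno | server/lib/parser.py | parse_data_args
-- ===== SOURCE A (Python) =====
-- from typing import Dict, Any, List, Tuple
--
-- def parse_data_args(data: Dict[str, Any], args: List[str]) -> List[Any]:
--     missing_args = []
--     values = []
--
--     for arg in args:
--         if arg not in data:
--             missing_args.append(arg)
--         else:
--             values.append(data[arg])
--
--     if missing_args != []:
--         raise Exception(f'missing args: {", ".join(missing_args)}')
--
--     return values
-- ===== SOURCE B (Python) =====
-- from typing import Dict, Any, List
--
-- def parse_data_args(data: Dict[str, Any], args: List[str]) -> List[Any]: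
--     # Inverted approach: index args by key once, then drive a single pass over
--     # data's items, filling a preallocated slot per requested position.
--     values = [0] * len(args)
--     pos = {}
--     for i, arg in enumerate(args):
--         pos.setdefault(arg, []).append(i)
--     for key, value in data.items():
--         for i in pos.pop(key, ()):
--             values[i] = value
--     if pos:
--         bad = sorted(i for idxs in pos.values() for i in idxs)
--         raise Exception(f'missing args: {", ".join(args[i] for i in bad)}')
--     return values
-- ===== Notes on version B (the rewrite author's own statement) =====
-- stated objective: alternative
-- what changed: Inverts the data flow: instead of looking each arg up in the dict, B builds an index map from arg name to its positions, preallocates the output slots, and fills them in a single pass over data's items; missing args are whatever positions remain unclaimed.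
import Mathlib
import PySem

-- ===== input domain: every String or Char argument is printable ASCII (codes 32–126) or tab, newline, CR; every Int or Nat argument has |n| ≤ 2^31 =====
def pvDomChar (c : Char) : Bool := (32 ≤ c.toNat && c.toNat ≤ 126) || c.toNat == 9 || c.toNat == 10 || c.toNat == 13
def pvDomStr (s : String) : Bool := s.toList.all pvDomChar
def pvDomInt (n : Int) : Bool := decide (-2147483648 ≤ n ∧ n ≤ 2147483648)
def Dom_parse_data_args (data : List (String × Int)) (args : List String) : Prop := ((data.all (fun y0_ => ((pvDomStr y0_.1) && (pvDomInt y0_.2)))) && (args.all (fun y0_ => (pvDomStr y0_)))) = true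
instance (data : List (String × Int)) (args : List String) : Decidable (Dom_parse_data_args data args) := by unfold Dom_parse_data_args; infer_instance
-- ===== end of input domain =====

-- B inverts the data flow: it indexes args by key once, then fills preallocated slots in one pass over data's items; same claimed behaviour, a genuinely different algorithm of similar cost.

-- ===== PORT A =====
-- A's single loop accumulating (missing_args, values); the final raise (missing_args ≠ []) is excluded by Pre_ (the port returns [] there).
def parse_data_args (data : List (String × Int)) (args : List String) : List Int :=
  let st := args.foldl (fun (p : List String × List Int) arg =>
    match (PySem.Dict.mk data).get? arg with
    | none => (p.1 ++ [arg], p.2)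
    | some v => (p.1, p.2 ++ [v])) ([], [])
  if st.1 ≠ [] then [] else st.2

-- ===== PORT B =====
-- Source B: values = [0]*len(args); pos maps each arg to its index list; one pass over data's
-- items pops each key's index list and writes the value into those slots; 'if pos:' raises
-- (excluded by Pre_, the port returns [] there), else the slots are returned.
def parse_data_args_alt (data : List (String × Int)) (args : List String) : List Int :=
  let values : List Int := List.replicate args.length 0
  let pos : PySem.Dict String (List Int) :=
    (PySem.List.enumerate args).foldl
      (fun d ia => d.modify ia.2 [] (fun l => l ++ [ia.1])) PySem.Dict.empty
  let st := data.foldl (fun (st : List Int × PySem.Dict String (List Int)) kv =>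
      match st.2.get? kv.1 with
      | none => st
      | some idxs => (idxs.foldl (fun vs i => vs.set i.toNat kv.2) st.1, st.2.erase kv.1))
    (values, pos)
  if st.2.size ≠ 0 then [] else st.1

-- ===== PRECONDITION & SPEC =====
-- A raises Exception when some requested key is absent from data; exactly those inputs are excluded.
def Pre_parse_data_args (data : List (String × Int)) (args : List String) : Prop :=
  ∀ a ∈ args, (PySem.Dict.mk data).contains a = true
instance (data : List (String × Int)) (args : List String) : Decidable (Pre_parse_data_args data args) := by unfold Pre_parse_data_args; infer_instance

def pvWitness_parse_data_args : (List (String × Int)) × List String :=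
  ([("x", 3), ("y", 7)], ["y", "x", "y"])

def Spec_parse_data_args (data : List (String × Int)) (args : List String) (out : List Int) : Prop := out = parse_data_args_alt data args
instance (data : List (String × Int)) (args : List String) (out : List Int) : Decidable (Spec_parse_data_args data args out) := by unfold Spec_parse_data_args; infer_instance

-- ===== CLAIM (what is proved, stated in full; the proofs are below) =====
def Claim_equal_parse_data_args : Prop := ∀ (data : List (String × Int)) (args : List String), Dom_parse_data_args data args → Pre_parse_data_args data args → Spec_parse_data_args data args (parse_data_args data args)

-- ===== LEMMAS AND PROOFS =====

-- the index list B's pos holds for a key a: all positions of a in args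
def pvIdxsOf (args : List String) (a : String) : List Int :=
  ((PySem.List.enumerate args).filter (fun ia => ia.2 == a)).map (·.1)

-- B's per-item step and fold, named for the proofs (identical to the lambda in the port)
def pvStep (st : List Int × PySem.Dict String (List Int)) (kv : String × Int) :
    List Int × PySem.Dict String (List Int) :=
  match st.2.get? kv.1 with
  | none => st
  | some idxs => (idxs.foldl (fun vs i => vs.set i.toNat kv.2) st.1, st.2.erase kv.1)

def pvFill (rest : List (String × Int)) (vs : List Int) (d : PySem.Dict String (List Int)) :
    List Int × PySem.Dict String (List Int) :=
  rest.foldl pvStep (vs, d)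

-- A's loop, when every key is present, leaves the missing list untouched and appends each value in order.
theorem parse_gather (data : List (String × Int)) (args : List String)
    (h : ∀ a ∈ args, (PySem.Dict.mk data).contains a = true)
    (m : List String) (v : List Int) :
    args.foldl (fun (p : List String × List Int) arg =>
      match (PySem.Dict.mk data).get? arg with
      | none => (p.1 ++ [arg], p.2)
      | some w => (p.1, p.2 ++ [w])) (m, v)
    = (m, v ++ args.map (fun a => ((PySem.Dict.mk data).get? a).getD 0)) := by
  induction args generalizing m v with
  | nil => simp
  | cons a rest ih =>
    have hc := h a (by simp)
    rw [PySem.Dict.contains_eq_isSome_get?] at hc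
    obtain ⟨w, hw⟩ := Option.isSome_iff_exists.mp hc
    simp only [List.foldl_cons, hw]
    rw [ih (fun b hb => h b (by simp [hb]))]
    simp [hw]

theorem pvGet?_erase {ν : Type} (d : PySem.Dict String ν) (k a : String) :
    (d.erase k).get? a = if a = k then none else d.get? a := by
  simp [PySem.Dict.erase, PySem.Dict.get?]
  induction d.items with
  | nil => simp
  | cons p t ih => by_cases h : a = k <;> by_cases h2 : p.1 = a <;> simp_all

theorem pvMem_idxsOf (args : List String) (a : String) (j : Nat) :
    ((j : Int) ∈ pvIdxsOf args a) ↔ ∃ h : j < args.length, args[j] = a := by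
  simp only [pvIdxsOf, List.mem_map, List.mem_filter, PySem.List.mem_enumerate_iff]
  constructor
  · rintro ⟨⟨i, x⟩, ⟨⟨k, hk, hkx⟩, hx⟩, hi⟩
    cases hkx
    simp only at hi hx
    have : k = j := by omega
    subst this
    exact ⟨hk, by simpa using hx⟩
  · rintro ⟨hj, ha⟩
    exact ⟨((j : Int), args[j]), ⟨⟨j, hj, by simp⟩, by simp [ha]⟩, rfl⟩

theorem pvIdxsOf_nonneg (args : List String) (a : String) :
    ∀ i ∈ pvIdxsOf args a, 0 ≤ i := by
  intro i hi
  simp only [pvIdxsOf, List.mem_map, List.mem_filter, PySem.List.mem_enumerate_iff] at hi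
  obtain ⟨⟨x, y⟩, ⟨⟨k, hk, hkx⟩, _⟩, hx⟩ := hi
  cases hkx; simp only at hx; omega

theorem pvSetFold_length (idxs : List Int) (v : Int) (vs : List Int) :
    (idxs.foldl (fun vs i => vs.set i.toNat v) vs).length = vs.length := by
  induction idxs generalizing vs with
  | nil => rfl
  | cons i t ih => simp [ih]

theorem pvSetFold_getD (idxs : List Int) (v : Int) (vs : List Int) (j : Nat)
    (hj : j < vs.length) (hb : ∀ i ∈ idxs, 0 ≤ i) :
    (idxs.foldl (fun vs i => vs.set i.toNat v) vs).getD j 0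
      = if (j : Int) ∈ idxs then v else vs.getD j 0 := by
  induction idxs generalizing vs with
  | nil => simp
  | cons i t ih =>
    have hi : 0 ≤ i := hb i (by simp)
    simp only [List.foldl_cons]
    rw [ih (vs.set i.toNat v) (by simpa using hj) (fun x hx => hb x (by simp [hx]))]
    rw [List.getD_eq_getElem _ _ (by simpa using hj),
      List.getD_eq_getElem _ _ hj]
    by_cases ht : (j : Int) ∈ t
    · simp [ht]
    · by_cases he : (j : Int) = i
      · have h1 : i.toNat = j := by omega
        simp [he, h1]
      · have h1 : i.toNat ≠ j := by omega
        simp [ht, he, h1]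

theorem pvFill_len (rest : List (String × Int)) (vs : List Int)
    (d : PySem.Dict String (List Int)) : (pvFill rest vs d).1.length = vs.length := by
  induction rest generalizing vs d with
  | nil => rfl
  | cons kv t ih =>
    show (pvFill t (pvStep (vs, d) kv).1 (pvStep (vs, d) kv).2).1.length = vs.length
    unfold pvStep
    cases h : d.get? kv.1 with
    | none => exact ih vs d
    | some idxs =>
      rw [ih]
      exact pvSetFold_length idxs kv.2 vs

-- main invariant of B's fold over data: starting from a state whose dict holds correct index
-- lists for keys that all still occur in `rest`, the fold empties the dict and writes, for
-- every arg position whose key the dict tracks, the first-match value of that key in `rest`.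
theorem pvFill_invariant (args : List String) (rest : List (String × Int))
    (vs : List Int) (d : PySem.Dict String (List Int))
    (hlen : vs.length = args.length)
    (hidx : ∀ a idxs, d.get? a = some idxs → idxs = pvIdxsOf args a)
    (hsub : ∀ a, d.contains a = true → (PySem.Dict.mk rest).contains a = true) :
    (∀ a, (pvFill rest vs d).2.contains a = false)
    ∧ ∀ (j : Nat), j < args.length →
        (pvFill rest vs d).1.getD j 0
        = if d.contains args[j]! then ((PySem.Dict.mk rest).get? args[j]!).getD 0
          else vs.getD j 0 := by
  induction rest generalizing vs d with
  | nil =>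
    have hnc : ∀ a, d.contains a = false := by
      intro a
      by_cases h : d.contains a = true
      · have := hsub a h
        simp [PySem.Dict.contains] at this
      · simpa using h
    exact ⟨hnc, fun j hj => by simp [pvFill, hnc]⟩
  | cons kv t ih =>
    have hstep : pvFill (kv :: t) vs d = pvFill t (pvStep (vs, d) kv).1 (pvStep (vs, d) kv).2 := rfl
    cases hget : d.get? kv.1 with
    | none =>
      have hstate : pvStep (vs, d) kv = (vs, d) := by unfold pvStep; simp [hget]
      have hne : ∀ a, d.contains a = true → a ≠ kv.1 := by
        intro a ha he
        subst he
        rw [PySem.Dict.contains_eq_isSome_get?, hget] at ha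
        simp at ha
      have hsub' : ∀ a, d.contains a = true → (PySem.Dict.mk t).contains a = true := by
        intro a ha
        have h2 := hsub a ha
        simp only [PySem.Dict.contains, List.any_cons, Bool.or_eq_true] at h2 ⊢
        rcases h2 with h | h
        · exact absurd (id (Eq.symm (by simpa using h : kv.1 = a))) (hne a ha)
        · exact h
      obtain ⟨e1, e2⟩ := ih vs d hlen hidx hsub'
      refine ⟨by rw [hstep, hstate]; exact e1, ?_⟩
      intro j hj
      rw [hstep, hstate, e2 j hj]
      by_cases hc : d.contains args[j]! = true
      · have hne' : kv.1 ≠ args[j]! := Ne.symm (hne _ hc)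
        rw [if_pos hc, if_pos hc, PySem.Dict.get?_mk_cons, if_neg (by simpa using hne')]
      · rw [if_neg hc, if_neg hc]
    | some idxs =>
      have hidxs : idxs = pvIdxsOf args kv.1 := hidx _ _ hget
      have hcontains : d.contains kv.1 = true := by
        rw [PySem.Dict.contains_eq_isSome_get?, hget]; rfl
      have hstate : pvStep (vs, d) kv
          = (idxs.foldl (fun vs i => vs.set i.toNat kv.2) vs, d.erase kv.1) := by
        unfold pvStep; simp [hget]
      have hlen' : (idxs.foldl (fun vs i => vs.set i.toNat kv.2) vs).length = args.length := by
        rw [pvSetFold_length]; exact hlen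
      have hidx' : ∀ a l, (d.erase kv.1).get? a = some l → l = pvIdxsOf args a := by
        intro a l hl
        rw [pvGet?_erase] at hl
        by_cases ha : a = kv.1
        · simp [ha] at hl
        · rw [if_neg ha] at hl; exact hidx a l hl
      have hsub' : ∀ a, (d.erase kv.1).contains a = true → (PySem.Dict.mk t).contains a = true := by
        intro a ha
        rw [PySem.Dict.contains_eq_isSome_get?, pvGet?_erase] at ha
        by_cases he : a = kv.1
        · simp [he] at ha
        · rw [if_neg he] at ha
          rw [← PySem.Dict.contains_eq_isSome_get?] at ha
          have h2 := hsub a ha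
          simp only [PySem.Dict.contains, List.any_cons, Bool.or_eq_true] at h2 ⊢
          rcases h2 with h | h
          · exact absurd (by simpa using h : kv.1 = a) (fun hh => he hh.symm)
          · exact h
      obtain ⟨e1, e2⟩ := ih _ _ hlen' hidx' hsub'
      refine ⟨by rw [hstep, hstate]; exact e1, ?_⟩
      intro j hj
      rw [hstep, hstate, e2 j hj]
      have hnn : ∀ i ∈ idxs, 0 ≤ i := hidxs ▸ pvIdxsOf_nonneg args kv.1
      have hjv : args[j]! = args[j]'hj := by
        simp [List.getElem!_eq_getElem?_getD, List.getElem?_eq_getElem hj]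
      by_cases hkey : args[j]'hj = kv.1
      · -- this position's key is the one being consumed: its slot is written now
        have hmem : (j : Int) ∈ idxs := by
          rw [hidxs, pvMem_idxsOf]; exact ⟨hj, hkey⟩
        have hce : (d.erase kv.1).contains args[j]! = false := by
          rw [PySem.Dict.contains_eq_isSome_get?, pvGet?_erase, if_pos (hjv ▸ hkey)]; rfl
        rw [if_neg (by simpa using hce)]
        rw [pvSetFold_getD idxs kv.2 vs j (by omega) hnn, if_pos hmem]
        rw [PySem.Dict.get?_mk_cons]
        simp [hjv, hcontains, hkey]
      · have hce : (d.erase kv.1).contains args[j]! = d.contains args[j]! := by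
          rw [PySem.Dict.contains_eq_isSome_get?, PySem.Dict.contains_eq_isSome_get?,
            pvGet?_erase, if_neg (hjv ▸ hkey)]
        rw [hce]
        have hnmem : (j : Int) ∉ idxs := by
          rw [hidxs, pvMem_idxsOf]; rintro ⟨_, h⟩; exact hkey h
        by_cases hc : d.contains args[j]! = true
        · rw [if_pos hc, if_pos hc, PySem.Dict.get?_mk_cons,
            if_neg (by simpa [hjv] using fun hh => hkey (by simp [hh]))]
        · rw [if_neg hc, if_neg hc,
            pvSetFold_getD idxs kv.2 vs j (by omega) hnn, if_neg hnmem]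

-- characterization of B's initial pos dict
theorem pvPos_get? (args : List String) (a : String) (idxs : List Int)
    (h : ((PySem.List.enumerate args).foldl
      (fun d ia => d.modify ia.2 [] (fun l => l ++ [ia.1])) PySem.Dict.empty).get? a
      = some idxs) : idxs = pvIdxsOf args a := by
  have hg : ((PySem.List.enumerate args).foldl
      (fun d ia => d.modify ia.2 [] (fun l => l ++ [ia.1])) PySem.Dict.empty).getD a []
      = pvIdxsOf args a := by
    have hmap : (PySem.List.enumerate args).foldl
        (fun d ia => d.modify ia.2 [] (fun l => l ++ [ia.1])) PySem.Dict.empty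
        = ((PySem.List.enumerate args).map (fun ia => (ia.2, ia.1))).foldl
            (fun d p => d.modify p.1 [] (fun l => l ++ [p.2])) PySem.Dict.empty := by
      rw [List.foldl_map]
    rw [hmap, PySem.Dict.getD_foldl_modify_append]
    simp only [PySem.Dict.getD_empty, List.nil_append, pvIdxsOf, List.filter_map,
      List.map_map]
    rfl
  rw [PySem.Dict.getD_eq_get?_getD, h] at hg
  simpa using hg

theorem pvPos_keys (args : List String) (a : String) :
    ((PySem.List.enumerate args).foldl
      (fun d ia => d.modify ia.2 [] (fun l => l ++ [ia.1])) PySem.Dict.empty).contains a = true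
      → a ∈ args := by
  intro h
  rw [PySem.Dict.contains_iff_mem_keys] at h
  rw [PySem.Dict.keys_foldl_modify_key (PySem.List.enumerate args) (fun ia => ia.2)
    ([] : List Int) (fun _ ia => fun l => l ++ [ia.1]) PySem.Dict.empty] at h
  rw [PySem.List.map_snd_enumerate] at h
  have : a ∈ PySem.Set.update (PySem.Dict.empty : PySem.Dict String (List Int)).keys args := h
  rw [show (PySem.Dict.empty : PySem.Dict String (List Int)).keys = [] from rfl] at this
  have hu : PySem.Set.update ([] : List String) args = PySem.Set.ofList args := rfl
  rw [hu] at this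
  exact (PySem.Set.mem_ofList args a).mp this

-- a dict containing no key at all has no items
theorem pvDict_empty_of_no_keys {ν : Type} (d : PySem.Dict String ν)
    (h : ∀ a, d.contains a = false) : d.size = 0 := by
  cases hd : d.items with
  | nil => simp [PySem.Dict.size, hd]
  | cons p t =>
    have := h p.1
    simp [PySem.Dict.contains, hd] at this

-- ===== VERDICT (by name: the statement is the Claim_ definition above) =====
theorem parse_data_args_spec : Claim_equal_parse_data_args := by
  intro data args _ hpre
  unfold Spec_parse_data_args parse_data_args parse_data_args_alt
  rw [parse_gather data args hpre [] []]
  simp only [List.nil_append, ne_eq, ite_not]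
  have hfold : data.foldl (fun (st : List Int × PySem.Dict String (List Int)) kv =>
      match st.2.get? kv.1 with
      | none => st
      | some idxs => (idxs.foldl (fun vs i => vs.set i.toNat kv.2) st.1, st.2.erase kv.1))
      (List.replicate args.length 0,
        (PySem.List.enumerate args).foldl
          (fun d ia => d.modify ia.2 [] (fun l => l ++ [ia.1])) PySem.Dict.empty)
      = pvFill data (List.replicate args.length 0)
          ((PySem.List.enumerate args).foldl
            (fun d ia => d.modify ia.2 [] (fun l => l ++ [ia.1])) PySem.Dict.empty) := rfl
  rw [hfold]
  obtain ⟨e1, e2⟩ := pvFill_invariant args data (List.replicate args.length 0)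
    ((PySem.List.enumerate args).foldl
      (fun d ia => d.modify ia.2 [] (fun l => l ++ [ia.1])) PySem.Dict.empty)
    (by simp) (pvPos_get? args)
    (fun a ha => hpre a (pvPos_keys args a ha))
  have hsz := pvDict_empty_of_no_keys _ e1
  split_ifs with hs
  · apply List.ext_getElem
    · rw [pvFill_len]; simp
    · intro j h1 h2
      have hj : j < args.length := by
        have := pvFill_len data (List.replicate args.length 0)
          ((PySem.List.enumerate args).foldl
            (fun d ia => d.modify ia.2 [] (fun l => l ++ [ia.1])) PySem.Dict.empty)
        simp at this
        omega
      rw [← List.getD_eq_getElem _ 0 h2, e2 j hj]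
      have hjv : args[j]! = args[j]'hj := by
        simp [List.getElem!_eq_getElem?_getD, List.getElem?_eq_getElem hj]
      have hc : ((PySem.List.enumerate args).foldl
          (fun d ia => d.modify ia.2 [] (fun l => l ++ [ia.1])) PySem.Dict.empty).contains args[j]!
          = true := by
        rw [PySem.Dict.contains_iff_mem_keys,
          PySem.Dict.keys_foldl_modify_key (PySem.List.enumerate args) (fun ia => ia.2)
            ([] : List Int) (fun _ ia => fun l => l ++ [ia.1]) PySem.Dict.empty,
          PySem.List.map_snd_enumerate]
        exact (PySem.Set.mem_ofList args args[j]!).mpr (by rw [hjv]; simp)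
      rw [hc]
      simp [hjv, List.getElem_map]
  · simp at hs
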